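-- pv_equiv track=rewrite | github.com/princebharti/gitleakfix | leakfix/fixer.py | _format_push_summary
-- ===== SOURCE A (Python) =====
-- def _format_push_summary(push_results: dict[str, str]) -> str:
--     """Format the push results into a human-readable summary."""
--     if not push_results:
--         return ""
--
--     lines: list[str] = []
--     pushed = [b for b, s in push_results.items() if s == "pushed"]
--     protected = [b for b, s in push_results.items() if s == "protected"]
--     no_remote = [b for b, s in push_results.items() if s == "no_remote"]
--     errors = [b for b, s in push_results.items() if s == "error"]
--
--     # Show individual branch results
--     for branch in pushed:
--         lines.append(f"✓  Force pushed cleaned history to {branch}")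
--
--     for branch in protected:
--         lines.append(f"⚠️  Could not push {branch} (protected) — unprotect in GitLab/GitHub settings and re-run")
--
--     if no_remote:
--         lines.append("⚠️  No remote configured — run: git remote add origin <url>")
--
--     for branch in errors:
--         lines.append(f"⚠️  Failed to push {branch} (unknown error)")
--
--     # Add summary line
--     if lines:
--         lines.append("")
--         summary_parts = []
--         if pushed:
--             summary_parts.append(f"{len(pushed)} pushed")
--         if protected or no_remote or errors:
--             skipped_count = len(protected) + len(no_remote) + len(errors)
--             summary_parts.append(f"{skipped_count} skipped")
--         lines.append(f"Push summary: {', '.join(summary_parts)}")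
--
--     return "\n".join(lines)
-- ===== SOURCE B (Python) =====
-- def _format_push_summary(push_results: dict[str, str]) -> str:
--     """Format the push results into a human-readable summary."""
--     rank = {"pushed": 0, "protected": 1, "no_remote": 2, "error": 3}
--     items = sorted(
--         [(rank[s], b) for b, s in push_results.items() if s in rank],
--         key=lambda t: t[0],
--     )
--
--     lines: list[str] = []
--     n_pushed = 0
--     n_skipped = 0
--     seen_no_remote = False
--     for r, b in items:
--         if r == 0:
--             n_pushed += 1
--             lines.append(f"✓  Force pushed cleaned history to {b}")
--         else:
--             n_skipped += 1
--             if r == 1: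
--                 lines.append(f"⚠️  Could not push {b} (protected) — unprotect in GitLab/GitHub settings and re-run")
--             elif r == 2:
--                 if not seen_no_remote:
--                     seen_no_remote = True
--                     lines.append("⚠️  No remote configured — run: git remote add origin <url>")
--             else:
--                 lines.append(f"⚠️  Failed to push {b} (unknown error)")
--
--     if not lines:
--         return ""
--
--     parts = []
--     if n_pushed:
--         parts.append(f"{n_pushed} pushed")
--     if n_skipped:
--         parts.append(f"{n_skipped} skipped")
--     return "\n".join(lines + ["", f"Push summary: {', '.join(parts)}"])
-- ===== Notes on version B (the rewrite author's own statement) =====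
-- stated objective: alternative
-- what changed: Replaces A's four per-status filtering comprehensions plus four sequential emission loops with a sort-then-scan algorithm: each branch is tagged with a numeric rank, the tagged list is stably sorted by rank, and one sequential scan over the sorted list emits every line and maintains running pushed/skipped counters (collapsing the consecutive no_remote run into one line via a flag).
import Mathlib
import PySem

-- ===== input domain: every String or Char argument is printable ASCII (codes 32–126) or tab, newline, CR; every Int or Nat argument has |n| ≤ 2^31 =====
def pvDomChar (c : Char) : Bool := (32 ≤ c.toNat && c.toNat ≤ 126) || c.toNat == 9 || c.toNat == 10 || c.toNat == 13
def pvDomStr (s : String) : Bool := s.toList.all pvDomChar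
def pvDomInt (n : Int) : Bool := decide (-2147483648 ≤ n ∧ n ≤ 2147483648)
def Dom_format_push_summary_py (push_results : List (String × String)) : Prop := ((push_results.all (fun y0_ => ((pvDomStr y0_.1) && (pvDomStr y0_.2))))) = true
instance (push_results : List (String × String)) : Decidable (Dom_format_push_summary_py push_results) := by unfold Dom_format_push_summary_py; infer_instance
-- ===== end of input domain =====

-- B replaces A's four per-status filter passes + four emission loops with sort-then-scan:
-- rank-tag the branches, stable-sort by rank, then one scan emits lines and counts; objective: alternative.

-- ===== PORT A =====
-- literal port of A: four list comprehensions (filter-each-status), appends in loops,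
-- summary guarded by "protected or no_remote or errors"
def format_push_summary_py (push_results : List (String × String)) : String :=
  if push_results = [] then "" else
  let pushed    := push_results.filterMap (fun p => if p.2 = "pushed"    then some p.1 else none)
  let prot := push_results.filterMap (fun p => if p.2 = "protected" then some p.1 else none)
  let no_remote := push_results.filterMap (fun p => if p.2 = "no_remote" then some p.1 else none)
  let errors    := push_results.filterMap (fun p => if p.2 = "error"     then some p.1 else none)
  let lines : List String := []
  let lines := pushed.foldl (fun acc branch =>
    acc ++ ["✓  Force pushed cleaned history to " ++ branch]) lines
  let lines := prot.foldl (fun acc branch =>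
    acc ++ ["⚠️  Could not push " ++ branch ++ " (protected) — unprotect in GitLab/GitHub settings and re-run"]) lines
  let lines := if no_remote ≠ [] then
    lines ++ ["⚠️  No remote configured — run: git remote add origin <url>"] else lines
  let lines := errors.foldl (fun acc branch =>
    acc ++ ["⚠️  Failed to push " ++ branch ++ " (unknown error)"]) lines
  let lines := if lines ≠ [] then
    let summary_parts : List String := []
    let summary_parts := if pushed ≠ [] then
      summary_parts ++ [PySem.Int.toStr (pushed.length : Int) ++ " pushed"] else summary_parts
    let summary_parts := if prot ≠ [] ∨ no_remote ≠ [] ∨ errors ≠ [] then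
      summary_parts ++ [PySem.Int.toStr ((prot.length + no_remote.length + errors.length : Nat) : Int) ++ " skipped"]
      else summary_parts
    lines ++ [""] ++ ["Push summary: " ++ PySem.Str.join ", " summary_parts]
    else lines
  PySem.Str.join "\n" lines

-- ===== PORT B =====
-- B helper: the rank table "pushed"→0, "protected"→1, "no_remote"→2, "error"→3 (none = not in dict)
def fpsRank (s : String) : Option Int :=
  if s = "pushed" then some 0
  else if s = "protected" then some 1
  else if s = "no_remote" then some 2
  else if s = "error" then some 3
  else none

-- B helper: the body of the single scan over the sorted tagged list
-- state = (lines, n_pushed, n_skipped, seen_no_remote)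
def fpsStep (st : List String × Int × Int × Bool) (it : Int × String) :
    List String × Int × Int × Bool :=
  let (lines, n_pushed, n_skipped, seen) := st
  let (r, b) := it
  if r = 0 then
    (lines ++ ["✓  Force pushed cleaned history to " ++ b], n_pushed + 1, n_skipped, seen)
  else
    let n_skipped := n_skipped + 1
    if r = 1 then
      (lines ++ ["⚠️  Could not push " ++ b ++ " (protected) — unprotect in GitLab/GitHub settings and re-run"], n_pushed, n_skipped, seen)
    else if r = 2 then
      if seen then (lines, n_pushed, n_skipped, seen)
      else (lines ++ ["⚠️  No remote configured — run: git remote add origin <url>"], n_pushed, n_skipped, true)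
    else
      (lines ++ ["⚠️  Failed to push " ++ b ++ " (unknown error)"], n_pushed, n_skipped, seen)

def format_push_summary_py_alt (push_results : List (String × String)) : String :=
  let items := push_results.filterMap (fun p => (fpsRank p.2).map (fun r => (r, p.1)))
  let items := PySem.List.sorted items (fun t => t.1)
  let (lines, n_pushed, n_skipped, _) := items.foldl fpsStep ([], 0, 0, false)
  if lines = [] then "" else
  let parts : List String := if n_pushed ≠ 0 then [PySem.Int.toStr n_pushed ++ " pushed"] else []
  let parts := if n_skipped ≠ 0 then parts ++ [PySem.Int.toStr n_skipped ++ " skipped"] else parts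
  PySem.Str.join "\n" (lines ++ ["", "Push summary: " ++ PySem.Str.join ", " parts])

-- ===== PRECONDITION & SPEC =====
def Spec_format_push_summary_py (push_results : List (String × String)) (out : String) : Prop := out = format_push_summary_py_alt push_results
instance (push_results : List (String × String)) (out : String) : Decidable (Spec_format_push_summary_py push_results out) := by unfold Spec_format_push_summary_py; infer_instance

-- ===== CLAIM (what is proved, stated in full; the proofs are below) =====
def Claim_equal_format_push_summary_py : Prop := ∀ (push_results : List (String × String)), Dom_format_push_summary_py push_results → Spec_format_push_summary_py push_results (format_push_summary_py push_results)

-- ===== LEMMAS AND PROOFS =====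

-- insertBy into p ++ s where x goes exactly between p and s
theorem insertBy_between {α : Type} (before : α → α → Bool) (x : α) (p s : List α)
    (hp : ∀ y ∈ p, before x y = false) (hs : ∀ y ∈ s, before x y = true) :
    PySem.List.insertBy before x (p ++ s) = p ++ x :: s := by
  induction p with
  | nil =>
    cases s with
    | nil => simp [PySem.List.insertBy]
    | cons y ys => simp [PySem.List.insertBy, hs y (by simp)]
  | cons z p ih =>
    have hz : before x z = false := hp z (by simp)
    simp only [List.cons_append, PySem.List.insertBy, hz, Bool.false_eq_true, if_false,
      List.cons.injEq, true_and]
    exact ih (fun y hy => hp y (by simp [hy]))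

-- the stable sort by rank equals the concatenation of the four rank-homogeneous filters
theorem sorted_rank_buckets (l : List (Int × String))
    (h : ∀ x ∈ l, x.1 = 0 ∨ x.1 = 1 ∨ x.1 = 2 ∨ x.1 = 3) :
    PySem.List.sorted l (fun t => t.1) =
      l.filter (fun t => decide (t.1 = 0)) ++ l.filter (fun t => decide (t.1 = 1)) ++
      l.filter (fun t => decide (t.1 = 2)) ++ l.filter (fun t => decide (t.1 = 3)) := by
  rw [PySem.List.sorted_eq_foldl_insertBy]
  suffices H : ∀ (b0 b1 b2 b3 : List (Int × String)),
      (∀ y ∈ b0, y.1 = 0) → (∀ y ∈ b1, y.1 = 1) → (∀ y ∈ b2, y.1 = 2) → (∀ y ∈ b3, y.1 = 3) →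
      l.foldl (fun acc x => PySem.List.insertBy (fun a b => decide (a.1 < b.1)) x acc)
        (b0 ++ b1 ++ b2 ++ b3) =
      (b0 ++ l.filter (fun t => decide (t.1 = 0))) ++ (b1 ++ l.filter (fun t => decide (t.1 = 1))) ++
      (b2 ++ l.filter (fun t => decide (t.1 = 2))) ++ (b3 ++ l.filter (fun t => decide (t.1 = 3))) by
    simpa using H [] [] [] [] (by simp) (by simp) (by simp) (by simp)
  induction l with
  | nil => intro b0 b1 b2 b3 _ _ _ _; simp
  | cons x tl ih =>
    intro b0 b1 b2 b3 h0 h1 h2 h3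
    have htl : ∀ y ∈ tl, y.1 = 0 ∨ y.1 = 1 ∨ y.1 = 2 ∨ y.1 = 3 :=
      fun y hy => h y (by simp [hy])
    have hx := h x (by simp)
    rw [List.foldl_cons]
    rcases hx with hx | hx | hx | hx
    · have hins : PySem.List.insertBy (fun a b => decide (a.1 < b.1)) x
          (b0 ++ (b1 ++ b2 ++ b3)) = b0 ++ x :: (b1 ++ b2 ++ b3) := by
        refine insertBy_between _ x _ _ (fun y hy => by simp [hx, h0 y hy]) ?_
        intro y hy
        simp only [List.append_assoc, List.mem_append] at hy
        rcases hy with hy | hy | hy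
        · simp [hx, h1 y hy]
        · simp [hx, h2 y hy]
        · simp [hx, h3 y hy]
      have hacc : b0 ++ b1 ++ b2 ++ b3 = b0 ++ (b1 ++ b2 ++ b3) := by
        simp [List.append_assoc]
      have hre : b0 ++ x :: (b1 ++ b2 ++ b3) = (b0 ++ [x]) ++ b1 ++ b2 ++ b3 := by
        simp [List.append_assoc]
      rw [hacc, hins, hre,
        ih htl (b0 ++ [x]) b1 b2 b3
          (by intro y hy; simp only [List.mem_append, List.mem_singleton] at hy
              rcases hy with hy | hy; exact h0 y hy; simp [hy, hx]) h1 h2 h3]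
      simp [hx, List.append_assoc]
    · have hins : PySem.List.insertBy (fun a b => decide (a.1 < b.1)) x
          ((b0 ++ b1) ++ (b2 ++ b3)) = (b0 ++ b1) ++ x :: (b2 ++ b3) := by
        refine insertBy_between _ x _ _ ?_ ?_
        · intro y hy
          simp only [List.mem_append] at hy
          rcases hy with hy | hy
          · simp [hx, h0 y hy]
          · simp [hx, h1 y hy]
        · intro y hy
          simp only [List.mem_append] at hy
          rcases hy with hy | hy
          · simp [hx, h2 y hy]
          · simp [hx, h3 y hy]
      have hacc : b0 ++ b1 ++ b2 ++ b3 = (b0 ++ b1) ++ (b2 ++ b3) := by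
        simp [List.append_assoc]
      have hre : (b0 ++ b1) ++ x :: (b2 ++ b3) = b0 ++ (b1 ++ [x]) ++ b2 ++ b3 := by
        simp [List.append_assoc]
      rw [hacc, hins, hre,
        ih htl b0 (b1 ++ [x]) b2 b3 h0
          (by intro y hy; simp only [List.mem_append, List.mem_singleton] at hy
              rcases hy with hy | hy; exact h1 y hy; simp [hy, hx]) h2 h3]
      simp [hx, List.append_assoc]
    · have hins : PySem.List.insertBy (fun a b => decide (a.1 < b.1)) x
          ((b0 ++ b1 ++ b2) ++ b3) = (b0 ++ b1 ++ b2) ++ x :: b3 := by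
        refine insertBy_between _ x _ _ ?_ (fun y hy => by simp [hx, h3 y hy])
        intro y hy
        simp only [List.append_assoc, List.mem_append] at hy
        rcases hy with hy | hy | hy
        · simp [hx, h0 y hy]
        · simp [hx, h1 y hy]
        · simp [hx, h2 y hy]
      have hre : (b0 ++ b1 ++ b2) ++ x :: b3 = b0 ++ b1 ++ (b2 ++ [x]) ++ b3 := by
        simp [List.append_assoc]
      rw [hins, hre,
        ih htl b0 b1 (b2 ++ [x]) b3 h0 h1
          (by intro y hy; simp only [List.mem_append, List.mem_singleton] at hy
              rcases hy with hy | hy; exact h2 y hy; simp [hy, hx]) h3]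
      simp [hx, List.append_assoc]
    · have hins : PySem.List.insertBy (fun a b => decide (a.1 < b.1)) x
          ((b0 ++ b1 ++ b2 ++ b3) ++ []) = (b0 ++ b1 ++ b2 ++ b3) ++ x :: [] := by
        refine insertBy_between _ x _ _ ?_ (by simp)
        intro y hy
        simp only [List.append_assoc, List.mem_append] at hy
        rcases hy with hy | hy | hy | hy
        · simp [hx, h0 y hy]
        · simp [hx, h1 y hy]
        · simp [hx, h2 y hy]
        · simp [hx, h3 y hy]
      have hre : (b0 ++ b1 ++ b2 ++ b3) ++ x :: [] = b0 ++ b1 ++ b2 ++ (b3 ++ [x]) := by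
        simp [List.append_assoc]
      rw [(by simp : b0 ++ b1 ++ b2 ++ b3 = (b0 ++ b1 ++ b2 ++ b3) ++ []), hins, hre,
        ih htl b0 b1 b2 (b3 ++ [x]) h0 h1 h2
          (by intro y hy; simp only [List.mem_append, List.mem_singleton] at hy
              rcases hy with hy | hy; exact h3 y hy; simp [hy, hx])]
      simp [hx, List.append_assoc]

-- the scan over a rank-homogeneous block, per rank
theorem scan_block0 (l : List (Int × String)) (h : ∀ y ∈ l, y.1 = 0)
    (lines : List String) (np ns : Int) (seen : Bool) :
    l.foldl fpsStep (lines, np, ns, seen) =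
      (lines ++ l.map (fun y => "✓  Force pushed cleaned history to " ++ y.2),
       np + l.length, ns, seen) := by
  induction l generalizing lines np with
  | nil => simp
  | cons y tl ih =>
    have hy : y.1 = 0 := h y (by simp)
    simp only [List.foldl_cons, fpsStep, hy]
    norm_num
    rw [ih (fun z hz => h z (by simp [hz]))]
    simp [List.append_assoc]
    omega

theorem scan_block1 (l : List (Int × String)) (h : ∀ y ∈ l, y.1 = 1)
    (lines : List String) (np ns : Int) (seen : Bool) :
    l.foldl fpsStep (lines, np, ns, seen) =
      (lines ++ l.map (fun y => "⚠️  Could not push " ++ y.2 ++ " (protected) — unprotect in GitLab/GitHub settings and re-run"),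
       np, ns + l.length, seen) := by
  induction l generalizing lines ns with
  | nil => simp
  | cons y tl ih =>
    have hy : y.1 = 1 := h y (by simp)
    simp only [List.foldl_cons, fpsStep, hy]
    norm_num
    rw [ih (fun z hz => h z (by simp [hz]))]
    simp [List.append_assoc]
    omega

theorem scan_block2 (l : List (Int × String)) (h : ∀ y ∈ l, y.1 = 2)
    (lines : List String) (np ns : Int) :
    l.foldl fpsStep (lines, np, ns, false) =
      (lines ++ (if l = [] then [] else ["⚠️  No remote configured — run: git remote add origin <url>"]),
       np, ns + l.length, !l.isEmpty) := by
  cases l with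
  | nil => simp
  | cons y tl =>
    have hy : y.1 = 2 := h y (by simp)
    have hseen : ∀ (l : List (Int × String)), (∀ y ∈ l, y.1 = 2) →
        ∀ (lines : List String) (np ns : Int),
        l.foldl fpsStep (lines, np, ns, true) = (lines, np, ns + l.length, true) := by
      intro l hl
      induction l with
      | nil => intro lines np ns; simp
      | cons z tl ih =>
        intro lines np ns
        have hz : z.1 = 2 := hl z (by simp)
        simp only [List.foldl_cons, fpsStep, hz]
        norm_num
        rw [ih (fun w hw => hl w (by simp [hw]))]
        simp; omega
    simp only [List.foldl_cons, fpsStep, hy]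
    norm_num
    rw [hseen tl (fun z hz => h z (by simp [hz]))]
    simp; omega

theorem scan_block3 (l : List (Int × String)) (h : ∀ y ∈ l, y.1 = 3)
    (lines : List String) (np ns : Int) (seen : Bool) :
    l.foldl fpsStep (lines, np, ns, seen) =
      (lines ++ l.map (fun y => "⚠️  Failed to push " ++ y.2 ++ " (unknown error)"),
       np, ns + l.length, seen) := by
  induction l generalizing lines ns with
  | nil => simp
  | cons y tl ih =>
    have hy : y.1 = 3 := h y (by simp)
    simp only [List.foldl_cons, fpsStep, hy]
    norm_num
    rw [ih (fun z hz => h z (by simp [hz]))]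
    simp [List.append_assoc]
    omega

-- filtering the tagged list at rank r recovers A's per-status comprehension (tagged)
theorem items_filter (pr : List (String × String)) (r : Int) (st : String)
    (hr : fpsRank st = some r) (hinj : ∀ s, fpsRank s = some r → s = st) :
    (pr.filterMap (fun p => (fpsRank p.2).map (fun q => (q, p.1)))).filter
        (fun t => decide (t.1 = r)) =
      (pr.filterMap (fun p => if p.2 = st then some p.1 else none)).map (fun b => (r, b)) := by
  induction pr with
  | nil => simp
  | cons hd tl ih =>
    simp only [List.filterMap_cons]
    cases hq : fpsRank hd.2 with
    | none =>
      have hst : ¬ hd.2 = st := fun he => by rw [he, hr] at hq; cases hq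
      simp [hst, ih]
    | some q =>
      by_cases hqr : q = r
      · have hst : hd.2 = st := hinj _ (by rw [hq, hqr])
        simp [hst, hqr, ih]
      · have hst : ¬ hd.2 = st := fun he => by
          rw [he, hr] at hq; exact hqr (Option.some.inj hq).symm
        simp [hst, hqr, ih]

theorem fpsRank_inj0 : ∀ s, fpsRank s = some 0 → s = "pushed" := by
  intro s hs; unfold fpsRank at hs; split_ifs at hs with c1 c2 c3 c4 <;> simp_all

theorem fpsRank_inj1 : ∀ s, fpsRank s = some 1 → s = "protected" := by
  intro s hs; unfold fpsRank at hs; split_ifs at hs with c1 c2 c3 c4 <;> simp_all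

theorem fpsRank_inj2 : ∀ s, fpsRank s = some 2 → s = "no_remote" := by
  intro s hs; unfold fpsRank at hs; split_ifs at hs with c1 c2 c3 c4 <;> simp_all

theorem fpsRank_inj3 : ∀ s, fpsRank s = some 3 → s = "error" := by
  intro s hs; unfold fpsRank at hs; split_ifs at hs with c1 c2 c3 c4 <;> simp_all

theorem items_rank_bound (pr : List (String × String)) :
    ∀ x ∈ pr.filterMap (fun p => (fpsRank p.2).map (fun q => (q, p.1))),
      x.1 = 0 ∨ x.1 = 1 ∨ x.1 = 2 ∨ x.1 = 3 := by
  intro x hx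
  simp only [List.mem_filterMap, Option.map_eq_some_iff] at hx
  obtain ⟨p, _, q, hq, rfl⟩ := hx
  unfold fpsRank at hq
  split_ifs at hq <;> simp_all

-- ===== VERDICT (by name: the statement is the Claim_ definition above) =====
theorem format_push_summary_py_spec : Claim_equal_format_push_summary_py := by
  intro pr _
  unfold Spec_format_push_summary_py format_push_summary_py format_push_summary_py_alt
  simp only [ne_eq]
  rw [sorted_rank_buckets _ (items_rank_bound pr),
      items_filter pr 0 "pushed" rfl fpsRank_inj0,
      items_filter pr 1 "protected" rfl fpsRank_inj1,
      items_filter pr 2 "no_remote" rfl fpsRank_inj2,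
      items_filter pr 3 "error" rfl fpsRank_inj3]
  set P := pr.filterMap (fun p => if p.2 = "pushed" then some p.1 else none) with hP
  set Pr := pr.filterMap (fun p => if p.2 = "protected" then some p.1 else none) with hPr
  set NR := pr.filterMap (fun p => if p.2 = "no_remote" then some p.1 else none) with hNR
  set E := pr.filterMap (fun p => if p.2 = "error" then some p.1 else none) with hE
  rw [List.foldl_append, List.foldl_append, List.foldl_append,
      scan_block0 (P.map (fun b => ((0 : Int), b))) (by simp) _ _ _ _,
      scan_block1 (Pr.map (fun b => ((1 : Int), b))) (by simp) _ _ _ _,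
      scan_block2 (NR.map (fun b => ((2 : Int), b))) (by simp) _ _ _,
      scan_block3 (E.map (fun b => ((3 : Int), b))) (by simp) _ _ _ _,
      PySem.List.foldl_append_singleton_eq_map, PySem.List.foldl_append_singleton_eq_map,
      PySem.List.foldl_append_singleton_eq_map]
  simp only [List.map_map, Function.comp_def, List.length_map, List.nil_append,
    List.map_eq_nil_iff, zero_add, ne_eq]
  have hns : (Pr.length : Int) + ↑NR.length + ↑E.length =
      ((Pr.length + NR.length + E.length : Nat) : Int) := by push_cast; ring
  simp only [hns, Int.natCast_eq_zero, List.length_eq_zero_iff, Nat.add_eq_zero_iff]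
  by_cases hpr : pr = []
  · subst hpr
    simp [hP, hPr, hNR, hE] at *
  · simp only [hpr, if_false]
    by_cases h1 : P = [] <;> by_cases h2 : Pr = [] <;> by_cases h3 : NR = [] <;>
      by_cases h4 : E = [] <;>
      simp [h1, h2, h3, h4, List.append_assoc, PySem.Str.join]
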